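-- pv_equiv track=rewrite | github.com/daniel-reich/ubiquitous-fiesta | GP6cjzQ3xs9gJ8Q2b_17.py | is_polydivisible
-- ===== SOURCE A (Python) =====
-- def is_polydivisible(n, index = 0):
--   if isinstance(n, str) == False:
--     n = str(n)
--   if index == len(n):
--     return True
--
--   tn = int(n[:index+1])
--   td = index + 1
--
--   if tn % td != 0:
--     return False
--
--   return is_polydivisible(n, td)
-- ===== SOURCE B (Python) =====
-- def is_polydivisible(n, index=0):
--     if not isinstance(n, str):
--         n = str(n)
--     if index > len(n):
--         return False  # no prefix of that length exists
--     # check the prefixes longest-first: the long prefixes are the most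
--     # constrained, so on a non-polydivisible number this usually fails at once
--     for i in range(len(n) - 1, index - 1, -1):
--         if int(n[:i+1]) % (i+1) != 0:
--             return False
--     return True
-- ===== Notes on version B (the rewrite author's own statement) =====
-- stated objective: alternative
-- what changed: Replaces A's tail recursion with a reversed for-loop that checks the prefixes longest-first (order of the divisibility checks does not matter for the conjunction), with an explicit up-front rejection of an index past the end of the digit string instead of A's recursion past the end.
-- outside the precondition, e.g. on is_polydivisible(123, -3): A returns False, B raises ValueError
import Mathlib
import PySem

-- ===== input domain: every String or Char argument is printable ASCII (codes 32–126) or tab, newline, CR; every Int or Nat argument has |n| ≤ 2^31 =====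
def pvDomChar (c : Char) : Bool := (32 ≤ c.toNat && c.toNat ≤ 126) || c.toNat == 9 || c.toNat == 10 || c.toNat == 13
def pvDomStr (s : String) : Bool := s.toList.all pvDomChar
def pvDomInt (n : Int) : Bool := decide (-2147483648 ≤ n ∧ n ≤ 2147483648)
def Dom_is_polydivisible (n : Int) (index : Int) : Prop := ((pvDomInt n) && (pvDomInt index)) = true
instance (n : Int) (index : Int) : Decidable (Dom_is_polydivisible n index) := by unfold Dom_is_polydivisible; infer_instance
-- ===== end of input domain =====

-- B replaces A's tail recursion by a reversed for-loop checking the prefixes longest-first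
-- (the order of the divisibility checks does not matter), with an explicit up-front rejection
-- of an index past the end of the digit string; same return value on all of Pre_.

-- ===== PORT A =====
-- A's recursion on the digit string; i is the Python `index`.  Where the Python raises
-- (int('') / int('-') on a sliced prefix) the parse is `none` and we return false (outside Pre_);
-- the `hz` arm is a divergence guard: there Python A recurses forever (only str(0) past its end,
-- RecursionError, outside Pre_).  Everywhere else this is A's code step for step.
def polyRecA (s : List Char) (i : Nat) : Bool :=
  if i = s.length then true
  else
    match heq : PySem.Int.ofChars? (PySem.List.slice s none (some ((i : Int) + 1))) with
    | none => false
    | some tn =>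
      if hm : PySem.Int.mod tn ((i : Int) + 1) ≠ 0 then false
      else if hz : tn = 0 ∧ s.length < i then false
      else polyRecA s (i + 1)
termination_by s.length + (PySem.Int.ofChars? s).elim 0 Int.natAbs + 1 - i
decreasing_by
  by_cases hlt : i ≤ s.length
  · omega
  · -- past the end of the string: the slice is the whole string, its value tn ≠ 0, and (i+1) ∣ tn
    have hgt : s.length < i := by omega
    have hsl : PySem.List.slice s none (some ((i : Int) + 1)) = s := by
      rw [PySem.List.slice_to s (b := (i : Int) + 1) (by omega)]
      exact List.take_of_length_le (by omega)
    rw [hsl] at heq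
    have htn : tn ≠ 0 := fun h0 => hz ⟨h0, hgt⟩
    have hdvd : ((i : Int) + 1) ∣ tn := (PySem.Int.mod_eq_zero_iff_dvd tn _).mp (by omega)
    have hle : i + 1 ≤ tn.natAbs := by
      have := Int.natAbs_dvd_natAbs.mpr hdvd
      have h1 : ((i : Int) + 1).natAbs = i + 1 := by omega
      exact h1 ▸ Nat.le_of_dvd (Int.natAbs_pos.mpr htn) this
    simp [heq, Option.elim]
    omega

def is_polydivisible (n : Int) (index : Int) : Bool :=
  let s := PySem.Int.toChars n    -- n = str(n)
  if index < 0 then false else polyRecA s index.toNat   -- negative index: Python raises, outside Pre_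

-- ===== PORT B =====
-- the loop body's test: int(n[:i+1]) % (i+1) == 0 (false also where int() would raise, outside Pre_)
def prefixOKB (s : List Char) (i : Int) : Bool :=
  match PySem.Int.ofChars? (PySem.List.slice s none (some (i + 1))) with
  | none => false
  | some tn => PySem.Int.mod tn (i + 1) == 0

-- B: `if index > len(n): return False`, then the reversed for-loop over range(len(n)-1, index-1, -1)
def is_polydivisible_alt (n : Int) (index : Int) : Bool :=
  let s := PySem.Int.toChars n    -- n = str(n)
  if (s.length : Int) < index then false
  else (PySem.List.pyRange ((s.length : Int) - 1) (index - 1) (-1)).all (fun i => prefixOKB s i)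

-- ===== PRECONDITION & SPEC =====
-- Pre_ excludes exactly the inputs where Python A does not return normally: a negative index and
-- index 0 with negative n raise ValueError (int('') / int('-')), and n = 0 with index ≥ 2
-- recurses forever (RecursionError).  On a negative index A either raises ValueError or returns
-- False via Python's negative-slice wraparound; B there either raises ValueError too or returns
-- the same False, never a different value.
def Pre_is_polydivisible (n : Int) (index : Int) : Prop :=
  0 ≤ index ∧ (n < 0 → index ≠ 0) ∧ (n = 0 → index ≤ 1)
instance (n : Int) (index : Int) : Decidable (Pre_is_polydivisible n index) := by
  unfold Pre_is_polydivisible; infer_instance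
def pvWitness_is_polydivisible : Int × Int := (120, 0)

def Spec_is_polydivisible (n : Int) (index : Int) (out : Bool) : Prop := out = is_polydivisible_alt n index
instance (n : Int) (index : Int) (out : Bool) : Decidable (Spec_is_polydivisible n index out) := by unfold Spec_is_polydivisible; infer_instance

-- ===== CLAIM (what is proved, stated in full; the proofs are below) =====
def Claim_equal_is_polydivisible : Prop := ∀ (n : Int) (index : Int), Dom_is_polydivisible n index → Pre_is_polydivisible n index → Spec_is_polydivisible n index (is_polydivisible n index)

-- ===== LEMMAS AND PROOFS =====

-- A's recursion, characterised as the conjunction of the prefix checks over [i, len s)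
-- (false whenever i has run past the end of the string)
theorem polyRecA_eq_all (s : List Char) (i : Nat) :
    polyRecA s i
      = (decide (i ≤ s.length)
          && (PySem.List.pyRange (i : Int) (s.length : Int) 1).all (fun j => prefixOKB s j)) := by
  fun_induction polyRecA s i with
  | case1 =>
    rw [PySem.List.pyRange_one_eq_nil (by omega)]
    simp
  | case2 i h heq =>
    -- int() raises on this prefix: the check at j = i is false
    rcases Nat.lt_or_ge i s.length with hlt | hge
    · rw [PySem.List.pyRange_one_cons (by omega)]
      simp [prefixOKB, heq, hlt.le]
    · have : s.length < i := by omega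
      simp [Nat.not_le.mpr this]
  | case3 i h tn heq hm =>
    -- the prefix check at j = i fails
    rcases Nat.lt_or_ge i s.length with hlt | hge
    · rw [PySem.List.pyRange_one_cons (by omega)]
      have hok : prefixOKB s (i : Int) = false := by
        simp only [prefixOKB, heq]
        exact beq_eq_false_iff_ne.mpr hm
      simp [hok, hlt.le]
    · have : s.length < i := by omega
      simp [Nat.not_le.mpr this]
  | case4 i h tn heq hm hz =>
    -- tn = 0 past the end of the string: i > len, both sides false
    simp [Nat.not_le.mpr hz.2]
  | case5 i h tn heq hm hz ih =>
    -- the prefix check at j = i passes: step to i + 1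
    rcases Nat.lt_or_ge i s.length with hlt | hge
    · have hcons : PySem.List.pyRange (i : Int) (s.length : Int) 1
          = (i : Int) :: PySem.List.pyRange ((i : Int) + 1) (s.length : Int) 1 :=
        PySem.List.pyRange_one_cons (by omega)
      rw [ih, hcons]
      have hok : prefixOKB s (i : Int) = true := by
        simp only [prefixOKB, heq]
        exact beq_iff_eq.mpr (not_not.mp hm)
      push_cast
      simp [hok, hlt.le, Nat.succ_le_of_lt hlt]
    · -- i > len (and i ≠ len): both sides are false
      have hgt : s.length < i := by omega
      rw [ih]
      simp [Nat.not_le.mpr hgt, Nat.not_le.mpr (Nat.lt_succ_of_lt hgt)]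

-- ===== VERDICT (by name: the statement is the Claim_ definition above) =====
theorem is_polydivisible_spec : Claim_equal_is_polydivisible := by
  intro n index _ hpre
  obtain ⟨hidx, -, -⟩ := hpre
  unfold Spec_is_polydivisible is_polydivisible is_polydivisible_alt
  dsimp only
  set s := PySem.Int.toChars n with hs
  rw [if_neg (by omega), polyRecA_eq_all,
      PySem.List.pyRange_neg_one_eq_reverse, List.all_reverse]
  have hcast : ((index.toNat : Nat) : Int) = index := Int.toNat_of_nonneg hidx
  by_cases hgt : (s.length : Int) < index
  · rw [if_pos hgt]
    have : ¬ (index.toNat ≤ s.length) := by omega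
    simp [this]
  · rw [if_neg hgt]
    have h1 : index - 1 + 1 = index := by ring
    have h2 : (s.length : Int) - 1 + 1 = (s.length : Int) := by ring
    have hle : index.toNat ≤ s.length := by omega
    rw [h1, h2, ← hcast]
    simp only [Int.toNat_natCast]
    simp [hle]
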